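-- pv_equiv track=rewrite | github.com/tenick/cp | Algolympics/2022/elims/F2.py | maxReverse
-- ===== SOURCE A (Python) =====
-- def maxReverse(a, b):
--     dp = [[0 for _ in range(len(a))] for _ in range(len(a))]
--
--     for i in range(len(a)):
--         for j in range(i + 1):
--             s = j
--             e = j + len(a) - i - 1
--
--             L1 = a[s] == b[s]
--             L2 = a[e] == b[e]
--             oppL1 = a[s] == b[e]
--             oppL2 = a[e] == b[s]
--
--             if s - 1 >= 0 and e + 1 < len(a) and e - s + 2 < len(a):
--                 update = max(0, dp[e - s + 2][s - 1] + oppL1 + oppL2 - (L1 + L2))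
--                 dp[e - s][s] = update
--             else:
--                 newMemo = max(0, oppL1 + oppL2 - (L1 + L2))
--                 dp[e - s][s] = newMemo
--
--     maxReverseVal = 0
--     for i in range(1 + (len(a) >= 2)):
--         for j in range(len(a)):
--             maxReverseVal = max(maxReverseVal, dp[i][j])
--
--     for i in range(len(a)):
--         if a[i] == b[i]:
--             maxReverseVal += 1
--
--     return maxReverseVal
-- ===== SOURCE B (Python) =====
-- def maxReverse(a, b):
--     n = len(a)
--     best = 0
--     for c in range(2 * n - 1):
--         lo, hi = c // 2, c - c // 2
--         cur = 0
--         for r in range(min(lo, n - 1 - hi), -1, -1):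
--             s, e = lo - r, hi + r
--             g = (a[s] == b[e]) + (a[e] == b[s]) - (a[s] == b[s]) - (a[e] == b[e])
--             cur = max(0, cur + g)
--         best = max(best, cur)
--     return best + sum(a[i] == b[i] for i in range(n))
-- ===== Notes on version B (the rewrite author's own statement) =====
-- stated objective: faster
-- what changed: Replaces the n-by-n dp table filled in diagonal order by independent per-center linear Kadane-style scans (one scan per reversal center, accumulating pair gains floored at 0) plus a separate baseline match count, removing the O(n^2) table allocation and indexing.
import Mathlib
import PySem

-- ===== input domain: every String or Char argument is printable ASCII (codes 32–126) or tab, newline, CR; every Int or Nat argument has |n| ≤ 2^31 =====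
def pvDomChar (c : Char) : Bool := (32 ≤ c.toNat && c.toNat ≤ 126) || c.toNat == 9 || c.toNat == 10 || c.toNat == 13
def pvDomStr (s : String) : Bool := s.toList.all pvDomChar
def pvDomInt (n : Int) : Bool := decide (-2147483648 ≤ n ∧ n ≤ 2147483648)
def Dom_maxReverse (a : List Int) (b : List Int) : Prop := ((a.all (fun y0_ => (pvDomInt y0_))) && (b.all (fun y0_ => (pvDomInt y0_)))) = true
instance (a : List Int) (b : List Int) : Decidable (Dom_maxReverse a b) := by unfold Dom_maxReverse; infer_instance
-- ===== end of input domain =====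

-- B replaces A's n×n dp table (filled in diagonal order) by independent per-center
-- Kadane-style scans over the symmetric pairs of each reversal center; equal return
-- value is proved for all inputs with a.length ≤ b.length (elsewhere both raise).

-- ===== PORT A =====
-- Python bool used as an int (True + True etc.)
def pvBi (x : Bool) : Int := if x then 1 else 0

-- dp[d][s] read (indices always in range in A; 0 default)
def pvRead (dp : List (List Int)) (d s : Nat) : Int := (dp.getD d []).getD s 0

-- body of A's inner loop (one (i, j) step of the dp fill)
def pvCell (a b : List Int) (n i : Nat) (dp : List (List Int)) (j : Nat) : List (List Int) :=
  let s := j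
  let e := j + n - i - 1
  let L1 := pvBi (a.getD s 0 == b.getD s 0)
  let L2 := pvBi (a.getD e 0 == b.getD e 0)
  let opp1 := pvBi (a.getD s 0 == b.getD e 0)
  let opp2 := pvBi (a.getD e 0 == b.getD s 0)
  let v := if 1 ≤ s ∧ e + 1 < n ∧ e - s + 2 < n then
      max 0 (pvRead dp (e - s + 2) (s - 1) + opp1 + opp2 - (L1 + L2))
    else
      max 0 (opp1 + opp2 - (L1 + L2))
  dp.set (e - s) ((dp.getD (e - s) []).set s v)

-- A's dp table after the two filling loops
def pvFill (a b : List Int) : List (List Int) :=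
  let n := a.length
  (List.range n).foldl
    (fun dp i => (List.range (i + 1)).foldl (pvCell a b n i) dp)
    ((List.range n).map (fun _ => (List.range n).map (fun _ => (0 : Int))))

def maxReverse (a : List Int) (b : List Int) : Int :=
  let n := a.length
  let dp := pvFill a b
  let m := (List.range (1 + (if 2 ≤ n then 1 else 0))).foldl
    (fun acc i => (List.range n).foldl (fun acc j => max acc (pvRead dp i j)) acc) 0
  (List.range n).foldl (fun acc i => if a.getD i 0 == b.getD i 0 then acc + 1 else acc) m

-- ===== PORT B =====
-- one step of B's inner scan: pair (lo - r, hi + r), gain floored at 0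
def pvChainStep (a b : List Int) (lo hi : Nat) (cur : Int) (r : Nat) : Int :=
  let s := lo - r
  let e := hi + r
  let g := pvBi (a.getD s 0 == b.getD e 0) + pvBi (a.getD e 0 == b.getD s 0)
           - pvBi (a.getD s 0 == b.getD s 0) - pvBi (a.getD e 0 == b.getD e 0)
  max 0 (cur + g)

-- B's scan for center c: r runs from min(lo, n-1-hi) down to 0
def pvChain (a b : List Int) (n c : Nat) : Int :=
  let lo := c / 2
  let hi := c - c / 2
  ((List.range (min lo (n - 1 - hi) + 1)).reverse).foldl (pvChainStep a b lo hi) 0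

def maxReverse_alt (a : List Int) (b : List Int) : Int :=
  let n := a.length
  let best := (List.range (2 * n - 1)).foldl (fun best c => max best (pvChain a b n c)) 0
  best + (List.range n).foldl (fun acc i => acc + pvBi (a.getD i 0 == b.getD i 0)) 0

-- ===== PRECONDITION & SPEC =====
-- Pre_ excludes exactly the inputs with len(b) < len(a), on which A (and B) raise IndexError.
def Pre_maxReverse (a : List Int) (b : List Int) : Prop := a.length ≤ b.length
instance (a : List Int) (b : List Int) : Decidable (Pre_maxReverse a b) := by
  unfold Pre_maxReverse; infer_instance

def pvWitness_maxReverse : List Int × List Int := ([1, 2, 2], [2, 1, 2])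

def Spec_maxReverse (a : List Int) (b : List Int) (out : Int) : Prop := out = maxReverse_alt a b
instance (a : List Int) (b : List Int) (out : Int) : Decidable (Spec_maxReverse a b out) := by
  unfold Spec_maxReverse; infer_instance

-- ===== CLAIM (what is proved, stated in full; the proofs are below) =====
def Claim_equal_maxReverse : Prop := ∀ (a : List Int) (b : List Int), Dom_maxReverse a b → Pre_maxReverse a b → Spec_maxReverse a b (maxReverse a b)

-- ===== LEMMAS AND PROOFS =====

def gA (a b : List Int) (s e : Nat) : Int :=
  pvBi (a.getD s 0 == b.getD e 0) + pvBi (a.getD e 0 == b.getD s 0)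
  - pvBi (a.getD s 0 == b.getD s 0) - pvBi (a.getD e 0 == b.getD e 0)

def tbl (a b : List Int) : Nat → Nat → Int
  | d, 0 => max 0 (gA a b 0 d)
  | d, s + 1 =>
    if s + 1 + d + 1 < a.length then
      max 0 (tbl a b (d + 2) s + gA a b (s + 1) (s + 1 + d))
    else
      max 0 (gA a b (s + 1) (s + 1 + d))
termination_by _ s => s

lemma getD_set_row (dp : List (List Int)) (d d' : Nat) (row : List Int) :
    (dp.set d row).getD d' [] = if d' = d ∧ d < dp.length then row else dp.getD d' [] := by
  simp [List.getD, List.getElem?_set]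
  split_ifs with h1 h2 h3 <;> try tauto
  all_goals simp_all

lemma getD_set_col (row : List Int) (s s' : Nat) (v : Int) :
    (row.set s v).getD s' 0 = if s' = s ∧ s < row.length then v else row.getD s' 0 := by
  simp [List.getD, List.getElem?_set]
  split_ifs with h1 h2 h3 <;> try tauto
  all_goals simp_all

lemma inner_fill (a b : List Int) (i : Nat) (hi : i < a.length)
    (dp : List (List Int))
    (hlen : dp.length = a.length)
    (hrow : ∀ d', d' < a.length → (dp.getD d' []).length = a.length)
    (hold : ∀ d' s', pvRead dp d' s' =
      if a.length - 1 - i < d' ∧ d' < a.length ∧ s' + d' < a.length then tbl a b d' s' else 0) :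
    ∀ m, m ≤ i + 1 →
      (((List.range m).foldl (pvCell a b a.length i) dp).length = a.length ∧
       (∀ d', d' < a.length →
         (((List.range m).foldl (pvCell a b a.length i) dp).getD d' []).length = a.length)) ∧
      (∀ d' s', pvRead ((List.range m).foldl (pvCell a b a.length i) dp) d' s' =
        if (a.length - 1 - i < d' ∧ d' < a.length ∧ s' + d' < a.length) ∨
           (d' = a.length - 1 - i ∧ s' < m) then tbl a b d' s' else 0) := by
  intro m
  induction m with
  | zero =>
    intro _
    refine ⟨⟨hlen, hrow⟩, ?_⟩
    intro d' s'
    simp only [List.range_zero, List.foldl_nil]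
    rw [hold d' s']
    have hiff : ((a.length - 1 - i < d' ∧ d' < a.length ∧ s' + d' < a.length) ∨
        (d' = a.length - 1 - i ∧ s' < 0)) ↔
        (a.length - 1 - i < d' ∧ d' < a.length ∧ s' + d' < a.length) := by omega
    rw [if_congr hiff.symm rfl rfl]
  | succ m ih =>
    intro hm
    obtain ⟨⟨hl, hr⟩, hv⟩ := ih (by omega)
    set n := a.length with hn
    set d := n - 1 - i with hd
    set dpm := (List.range m).foldl (pvCell a b n i) dp with hdpm
    have hstep : (List.range (m + 1)).foldl (pvCell a b n i) dp = pvCell a b n i dpm m := by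
      rw [List.range_succ, List.foldl_append, List.foldl_cons, List.foldl_nil]
    have he : m + n - i - 1 = m + d := by omega
    have hes : m + d - m = d := by omega
    have hdn : d < n := by omega
    have hmn : m < n := by omega
    -- the written value equals tbl a b d m
    have hvv : (if 1 ≤ m ∧ m + d + 1 < n ∧ m + d - m + 2 < n then
        max 0 (pvRead dpm (m + d - m + 2) (m - 1)
          + pvBi (a.getD m 0 == b.getD (m + d) 0) + pvBi (a.getD (m + d) 0 == b.getD m 0)
          - (pvBi (a.getD m 0 == b.getD m 0) + pvBi (a.getD (m + d) 0 == b.getD (m + d) 0)))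
      else
        max 0 (pvBi (a.getD m 0 == b.getD (m + d) 0) + pvBi (a.getD (m + d) 0 == b.getD m 0)
          - (pvBi (a.getD m 0 == b.getD m 0) + pvBi (a.getD (m + d) 0 == b.getD (m + d) 0))))
        = tbl a b d m := by
      rw [hes]
      match m with
      | 0 =>
        rw [if_neg (by omega), tbl]
        congr 1
        simp only [gA, Nat.zero_add]
        ring
      | (s + 1) =>
        have hcnd : (1 ≤ s + 1 ∧ s + 1 + d + 1 < n ∧ d + 2 < n) ↔ (s + 1 + d + 1 < n) := by omega
        by_cases hc : s + 1 + d + 1 < n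
        · rw [if_pos (hcnd.mpr hc)]
          have hread : pvRead dpm (d + 2) (s + 1 - 1) = tbl a b (d + 2) s := by
            rw [hv (d + 2) (s + 1 - 1)]
            rw [if_pos (by left; omega)]
            simp
          rw [hread, tbl, if_pos hc]
          congr 1
          simp only [gA]
          ring
        · rw [if_neg (by omega), tbl, if_neg hc]
          congr 1
          simp only [gA]
          ring
    have hrowlen : (dpm.getD d []).length = n := hr d hdn
    have hread2 : ∀ d' s',
        pvRead (dpm.set d ((dpm.getD d []).set m (tbl a b d m))) d' s' =
        if (d < d' ∧ d' < n ∧ s' + d' < n) ∨ (d' = d ∧ s' < m + 1) then tbl a b d' s' else 0 := by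
      intro d' s'
      unfold pvRead
      rw [getD_set_row, hl]
      by_cases hdd : d' = d
      · subst hdd
        rw [if_pos ⟨rfl, hdn⟩, getD_set_col, hrowlen]
        by_cases hss : s' = m
        · rw [if_pos ⟨hss, hmn⟩, if_pos (Or.inr ⟨rfl, by omega⟩), hss]
        · rw [if_neg (by tauto)]
          have hthis := hv d s'
          unfold pvRead at hthis
          rw [hthis]
          have hiff : ((d < d ∧ d < n ∧ s' + d < n) ∨ (d = d ∧ s' < m)) ↔
              ((d < d ∧ d < n ∧ s' + d < n) ∨ (d = d ∧ s' < m + 1)) := by omega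
          rw [if_congr hiff rfl rfl]
      · rw [if_neg (by tauto)]
        have := hv d' s'
        unfold pvRead at this
        rw [this]
        have hiff : ((d < d' ∧ d' < n ∧ s' + d' < n) ∨ (d' = d ∧ s' < m)) ↔
            ((d < d' ∧ d' < n ∧ s' + d' < n) ∨ (d' = d ∧ s' < m + 1)) := by tauto
        rw [if_congr hiff rfl rfl]
    have hcell : pvCell a b n i dpm m = dpm.set d ((dpm.getD d []).set m (tbl a b d m)) := by
      unfold pvCell
      simp only [he, hes]
      congr 1
      congr 1
      rw [← hvv, hes]
    refine ⟨⟨?_, ?_⟩, ?_⟩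
    · rw [hstep, hcell]
      simpa using hl
    · intro d'' hd''
      rw [hstep, hcell, getD_set_row]
      by_cases h : d'' = d ∧ d < dpm.length
      · rw [if_pos h]
        rw [List.length_set]
        rw [h.1] at hd''
        exact hrowlen
      · rw [if_neg h]
        exact hr d'' hd''
    · intro d' s'
      rw [hstep, hcell]
      exact hread2 d' s'

lemma fill_invariant (a b : List Int) :
    ∀ k, k ≤ a.length →
      let F := (List.range k).foldl
        (fun dp i => (List.range (i + 1)).foldl (pvCell a b a.length i) dp)
        ((List.range a.length).map (fun _ => (List.range a.length).map (fun _ => (0 : Int))))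
      (F.length = a.length ∧ (∀ d', d' < a.length → (F.getD d' []).length = a.length)) ∧
      (∀ d' s', pvRead F d' s' =
        if a.length - k ≤ d' ∧ d' < a.length ∧ s' + d' < a.length then tbl a b d' s' else 0) := by
  intro k
  induction k with
  | zero =>
    intro _
    set n := a.length with hn
    simp only [List.range_zero, List.foldl_nil]
    refine ⟨⟨by simp, ?_⟩, ?_⟩
    · intro d' hd'
      simp [List.getD, hd']
    · intro d' s'
      rw [if_neg (by omega)]
      simp only [pvRead, List.getD, List.getElem?_map]
      by_cases hd' : d' < n <;> simp [hd']
  | succ k ih =>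
    intro hk
    obtain ⟨⟨hl, hr⟩, hv⟩ := ih (by omega)
    set n := a.length with hn
    set F := (List.range k).foldl
        (fun dp i => (List.range (i + 1)).foldl (pvCell a b n i) dp)
        ((List.range n).map (fun _ => (List.range n).map (fun _ => (0 : Int)))) with hF
    have hkn : k < n := hk
    have hstep : (List.range (k + 1)).foldl
        (fun dp i => (List.range (i + 1)).foldl (pvCell a b n i) dp)
        ((List.range n).map (fun _ => (List.range n).map (fun _ => (0 : Int)))) =
        (List.range (k + 1)).foldl (pvCell a b n k) F := by
      rw [List.range_succ, List.foldl_append, List.foldl_cons, List.foldl_nil, List.range_succ]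
    have hold : ∀ d' s', pvRead F d' s' =
        if n - 1 - k < d' ∧ d' < n ∧ s' + d' < n then tbl a b d' s' else 0 := by
      intro d' s'
      rw [hv d' s']
      have hiff : (n - k ≤ d' ∧ d' < n ∧ s' + d' < n) ↔
          (n - 1 - k < d' ∧ d' < n ∧ s' + d' < n) := by omega
      rw [if_congr hiff rfl rfl]
    obtain ⟨⟨hl2, hr2⟩, hv2⟩ := inner_fill a b k hkn F hl hr hold (k + 1) (le_refl _)
    refine ⟨⟨by rw [hstep]; exact hl2, by rw [hstep]; exact hr2⟩, ?_⟩
    intro d' s'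
    rw [hstep, hv2 d' s']
    have hiff : ((n - 1 - k < d' ∧ d' < n ∧ s' + d' < n) ∨ (d' = n - 1 - k ∧ s' < k + 1)) ↔
        (n - (k + 1) ≤ d' ∧ d' < n ∧ s' + d' < n) := by omega
    rw [if_congr hiff rfl rfl]

lemma tbl_zero (a b : List Int) (d : Nat) : tbl a b d 0 = max 0 (gA a b 0 d) := by rw [tbl]

lemma tbl_succ (a b : List Int) (d s : Nat) : tbl a b d (s + 1) =
    if s + 1 + d + 1 < a.length then
      max 0 (tbl a b (d + 2) s + gA a b (s + 1) (s + 1 + d))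
    else max 0 (gA a b (s + 1) (s + 1 + d)) := by rw [tbl]

lemma chain_aux (a b : List Int) (lo d0 : Nat) (h : lo + d0 < a.length) :
    ((List.range (min lo (a.length - 1 - (lo + d0)) + 1)).reverse).foldl
      (pvChainStep a b lo (lo + d0)) 0 = tbl a b d0 lo := by
  set n := a.length with hn
  set rmax := min lo (n - 1 - (lo + d0)) with hrmax
  set q : Nat → Int := fun r => if r = rmax + 1 then 0 else tbl a b (d0 + 2 * r) (lo - r) with hq
  have hrlo : rmax ≤ lo := min_le_left _ _
  have hrhi : rmax ≤ n - 1 - (lo + d0) := min_le_right _ _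
  have stepq : ∀ r, r ≤ rmax → pvChainStep a b lo (lo + d0) (q (r + 1)) r = q r := by
    intro r hr
    have hqr : q r = tbl a b (d0 + 2 * r) (lo - r) := if_neg (by omega)
    simp only [pvChainStep]
    by_cases hrm : r = rmax
    · have hq1 : q (r + 1) = 0 := by rw [hq]; simp [hrm]
      rw [hq1, hqr, zero_add]
      rcases h' : lo - r with _ | s'
      · rw [tbl_zero]
        rw [show lo + d0 + r = d0 + 2 * r from by omega]
        simp [gA]
      · rw [tbl_succ, if_neg (by omega)]
        rw [show lo + d0 + r = s' + 1 + (d0 + 2 * r) from by omega]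
        simp [gA]
    · have hs' : lo - r = (lo - (r + 1)) + 1 := by omega
      have hq1 : q (r + 1) = tbl a b (d0 + 2 * (r + 1)) (lo - (r + 1)) := if_neg (by omega)
      rw [hqr, hq1, hs', tbl_succ, if_pos (by omega)]
      rw [show d0 + 2 * (r + 1) = d0 + 2 * r + 2 from by omega]
      rw [show lo + d0 + r = (lo - (r + 1)) + 1 + (d0 + 2 * r) from by omega]
      rw [show lo - (r + 1) + 1 = lo - r from by omega]
      simp [gA]
  have mainq : ∀ m, m ≤ rmax →
      ((List.range (m + 1)).reverse).foldl (pvChainStep a b lo (lo + d0)) (q (m + 1)) = q 0 := by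
    intro m
    induction m with
    | zero =>
      intro _
      simpa using stepq 0 (by omega)
    | succ m ih =>
      intro hm
      rw [List.range_succ, List.reverse_append, List.reverse_cons, List.reverse_nil,
        List.nil_append, List.singleton_append, List.foldl_cons]
      rw [stepq (m + 1) hm]
      exact ih (by omega)
  have hfin := mainq rmax le_rfl
  have h0 : q (rmax + 1) = 0 := by rw [hq]; simp
  have hq0 : q 0 = tbl a b d0 lo := by
    rw [hq]
    simp only [if_neg (show (0 : Nat) ≠ rmax + 1 from by omega)]
    norm_num
  rw [h0] at hfin
  rw [hfin, hq0]

lemma fill_read (a b : List Int) (d s : Nat) :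
    pvRead (pvFill a b) d s =
      if d < a.length ∧ s + d < a.length then tbl a b d s else 0 := by
  have := (fill_invariant a b a.length le_rfl).2 d s
  unfold pvFill
  rw [this]
  have hiff : (a.length - a.length ≤ d ∧ d < a.length ∧ s + d < a.length) ↔
      (d < a.length ∧ s + d < a.length) := by omega
  rw [if_congr hiff rfl rfl]

lemma chain_eq (a b : List Int) (c : Nat) (hc : c < 2 * a.length - 1) :
    pvChain a b a.length c = tbl a b (c - c / 2 - c / 2) (c / 2) := by
  unfold pvChain
  have h := chain_aux a b (c / 2) (c - c / 2 - c / 2) (by omega)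
  rw [show c / 2 + (c - c / 2 - c / 2) = c - c / 2 from by omega] at h
  exact h

lemma foldl_grow {F : Int → Nat → Int} (h : ∀ acc x, acc ≤ F acc x) :
    ∀ (l : List Nat) (init : Int), init ≤ l.foldl F init := by
  intro l
  induction l with
  | nil => intro init; simp
  | cons a l ih => intro init; exact le_trans (h init a) (ih (F init a))

lemma foldl_elem_ge {F : Int → Nat → Int} (h : ∀ acc x, acc ≤ F acc x)
    {x : Nat} {w : Int} (hw : ∀ acc, w ≤ F acc x) :
    ∀ (l : List Nat), x ∈ l → ∀ init, w ≤ l.foldl F init := by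
  intro l
  induction l with
  | nil => intro hmem; cases hmem
  | cons a l ih =>
    intro hmem init
    rcases List.mem_cons.mp hmem with h1 | h2
    · subst h1; exact le_trans (hw init) (foldl_grow h l _)
    · exact ih h2 _

lemma foldl_bound {F : Int → Nat → Int} {v : Int} :
    ∀ (l : List Nat) (init : Int), init ≤ v →
      (∀ acc x, x ∈ l → acc ≤ v → F acc x ≤ v) → l.foldl F init ≤ v := by
  intro l
  induction l with
  | nil => intro init h _; simpa using h
  | cons a l ih =>
    intro init h hstep
    exact ih _ (hstep init a (by simp) h) (fun acc x hx => hstep acc x (by simp [hx]))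

lemma max_eq (a b : List Int) :
    (List.range (1 + (if 2 ≤ a.length then 1 else 0))).foldl
      (fun acc i => (List.range a.length).foldl
        (fun acc j => max acc (pvRead (pvFill a b) i j)) acc) 0 =
    (List.range (2 * a.length - 1)).foldl
      (fun best c => max best (pvChain a b a.length c)) 0 := by
  set n := a.length with hn
  set K := 1 + (if 2 ≤ n then 1 else 0) with hK
  set mB := (List.range (2 * n - 1)).foldl (fun best c => max best (pvChain a b n c)) 0 with hmB
  set mA := (List.range K).foldl
      (fun acc i => (List.range n).foldl
        (fun acc j => max acc (pvRead (pvFill a b) i j)) acc) 0 with hmA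
  have hgB : ∀ (acc : Int) (x : Nat), acc ≤ max acc (pvChain a b n x) := fun acc x => le_max_left _ _
  have hgI : ∀ (i : Nat) (acc : Int) (x : Nat),
      acc ≤ max acc (pvRead (pvFill a b) i x) := fun i acc x => le_max_left _ _
  have hgO : ∀ (acc : Int) (i : Nat),
      acc ≤ (List.range n).foldl (fun acc j => max acc (pvRead (pvFill a b) i j)) acc :=
    fun acc i => foldl_grow (hgI i) _ _
  have hB0 : (0 : Int) ≤ mB := foldl_grow hgB _ _
  have hA0 : (0 : Int) ≤ mA := foldl_grow hgO _ _
  -- every dp cell value is ≤ mB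
  have hcell : ∀ i j, i < K → j < n → pvRead (pvFill a b) i j ≤ mB := by
    intro i j hiK hjn
    rw [fill_read]
    by_cases hval : i < n ∧ j + i < n
    · rw [if_pos hval]
      have hi2 : i < 2 := by
        by_cases h2 : 2 ≤ n <;> simp [h2] at hK <;> omega
      have hi1 : i = 1 → 2 ≤ n := by
        intro h1
        by_cases h2 : 2 ≤ n
        · exact h2
        · simp [h2] at hK; omega
      have hc : 2 * j + i < 2 * n - 1 := by
        rcases (show i = 0 ∨ i = 1 from by omega) with h | h
        · omega
        · have := hi1 h; omega
      have := chain_eq a b (2 * j + i) hc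
      have heq : tbl a b ((2 * j + i) - (2 * j + i) / 2 - (2 * j + i) / 2) ((2 * j + i) / 2)
          = tbl a b i j := by
        congr 1 <;> omega
      rw [heq] at this
      rw [← this]
      exact foldl_elem_ge hgB (fun acc => le_max_right _ _) _
        (List.mem_range.mpr hc) _
    · rw [if_neg hval]; exact hB0
  have hAB : mA ≤ mB := by
    apply foldl_bound _ _ hB0
    intro acc i hiK hacc
    apply foldl_bound _ _ hacc
    intro acc2 j hjn hacc2
    exact max_le hacc2 (hcell i j (List.mem_range.mp hiK) (List.mem_range.mp hjn))
  have hBA : mB ≤ mA := by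
    apply foldl_bound _ _ hA0
    intro acc c hcmem hacc
    have hc := List.mem_range.mp hcmem
    apply max_le hacc
    have hchain := chain_eq a b c hc
    set d0 := c - c / 2 - c / 2 with hd0
    set lo := c / 2 with hlo
    have hd0n : d0 < n ∧ lo + d0 < n := by omega
    have hread : pvRead (pvFill a b) d0 lo = tbl a b d0 lo := by
      rw [fill_read, if_pos (by omega)]
    have hd0K : d0 < K := by
      by_cases h2 : 2 ≤ n <;> simp [h2] at hK <;> omega
    rw [hchain, ← hread]
    apply foldl_elem_ge hgO _ _ (List.mem_range.mpr hd0K)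
    intro acc2
    exact foldl_elem_ge (hgI d0) (fun acc3 => le_max_right _ _) _
      (List.mem_range.mpr (by omega)) _
  exact le_antisymm hAB hBA

lemma baseline_shift (a b : List Int) (m : Int) :
    (List.range a.length).foldl
      (fun acc i => if a.getD i 0 == b.getD i 0 then acc + 1 else acc) m =
    m + (List.range a.length).foldl (fun acc i => acc + pvBi (a.getD i 0 == b.getD i 0)) 0 := by
  rw [PySem.List.foldl_add]
  induction (List.range a.length) generalizing m with
  | nil => simp
  | cons x l ih =>
    simp only [List.foldl_cons, List.map_cons, List.sum_cons, ih, pvBi]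
    split_ifs <;> ring

-- ===== VERDICT (by name: the statement is the Claim_ definition above) =====
theorem maxReverse_spec : Claim_equal_maxReverse := by
  intro a b _ _
  show maxReverse a b = maxReverse_alt a b
  unfold maxReverse maxReverse_alt
  rw [baseline_shift, max_eq]
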